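-- pv_equiv track=rewrite | github.com/devashish89/CountOccurrences | main.py | get_firstOccurrence
-- ===== SOURCE A (Python) =====
-- def get_firstOccurrence(l, x):
--     l.sort()
--     left = 0
--     right = len(l) - 1
--     while left <= right:
--         mid = (left + right) // 2
--         if x < l[mid]:
--             right = mid - 1
--         elif x > l[mid]:
--             left = mid + 1
--         elif l[mid] == x:
--             if mid == 0 or l[mid - 1] != l[mid]:
--                 return mid
--             else:
--                 right = mid - 1
--
--     return -1
-- ===== SOURCE B (Python) =====
-- def get_firstOccurrence(l, x):
--     # One pass: count elements strictly less than x and note whether x occurs.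
--     # (Unlike A, does not sort l in place; return value is identical.)
--     count = 0
--     found = False
--     for v in l:
--         if v < x:
--             count += 1
--         elif v == x:
--             found = True
--     return count if found else -1
-- ===== Notes on version B (the rewrite author's own statement) =====
-- stated objective: faster
-- what changed: Replaces sort-then-binary-search-for-first-occurrence with a single linear pass that counts elements strictly less than x (the first-occurrence index in the sorted list) and a found flag; B does not mutate l.
import Mathlib
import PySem

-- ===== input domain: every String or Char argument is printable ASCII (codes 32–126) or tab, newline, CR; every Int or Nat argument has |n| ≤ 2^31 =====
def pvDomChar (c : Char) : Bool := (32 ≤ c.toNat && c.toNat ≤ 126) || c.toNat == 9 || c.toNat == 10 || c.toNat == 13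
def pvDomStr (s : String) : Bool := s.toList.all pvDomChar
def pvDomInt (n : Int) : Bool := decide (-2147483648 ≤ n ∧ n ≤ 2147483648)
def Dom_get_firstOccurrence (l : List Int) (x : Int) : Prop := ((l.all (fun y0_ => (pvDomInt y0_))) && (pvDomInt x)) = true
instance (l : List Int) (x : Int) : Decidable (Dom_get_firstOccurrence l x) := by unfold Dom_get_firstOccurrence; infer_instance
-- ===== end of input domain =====

-- B replaces A's sort + binary search by a single counting pass (asymptotically faster);
-- A additionally sorts l in place (a side effect B does not reproduce): the equivalence proved
-- here is about the RETURN value only.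

-- ===== PORT A =====
-- A's while-loop as structural recursion on the interval width.  On every state reachable
-- from the entry point, 0 ≤ mid < s.length, so `(pyGet? …).getD 0` is exactly Python's l[mid]
-- there; Python's final `elif l[mid] == x` is always true for ints when the first two
-- comparisons fail (trichotomy), so it is ported as the trailing `else`.
def pvBsLoop (s : List Int) (x : Int) (left right : Int) : Int :=
  if h : left ≤ right then
    let mid := PySem.Int.floordiv (left + right) 2
    let v := (PySem.List.pyGet? s mid).getD 0
    if x < v then
      pvBsLoop s x left (mid - 1)
    else if v < x then
      pvBsLoop s x (mid + 1) right
    else if mid == 0 || !((PySem.List.pyGet? s (mid - 1)).getD 0 == v) then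
      mid
    else
      pvBsLoop s x left (mid - 1)
  else -1
termination_by (right + 1 - left).toNat
decreasing_by
  all_goals
    have hb := PySem.Int.floordiv_two_mid_bounds (lo := left) (hi := right) h
    omega

def get_firstOccurrence (l : List Int) (x : Int) : Int :=
  let s := PySem.List.sorted l (fun a => a) false
  pvBsLoop s x 0 ((s.length : Int) - 1)

-- ===== PORT B =====
-- single pass: count elements strictly below x, flag whether x occurs
def get_firstOccurrence_alt (l : List Int) (x : Int) : Int :=
  let st := l.foldl
    (fun (st : Int × Bool) v =>
      if v < x then (st.1 + 1, st.2) else if v == x then (st.1, true) else st)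
    (0, false)
  if st.2 then st.1 else -1

-- ===== PRECONDITION & SPEC =====
def Spec_get_firstOccurrence (l : List Int) (x : Int) (out : Int) : Prop := out = get_firstOccurrence_alt l x
instance (l : List Int) (x : Int) (out : Int) : Decidable (Spec_get_firstOccurrence l x out) := by unfold Spec_get_firstOccurrence; infer_instance

-- ===== CLAIM (what is proved, stated in full; the proofs are below) =====
def Claim_equal_get_firstOccurrence : Prop := ∀ (l : List Int) (x : Int), Dom_get_firstOccurrence l x → Spec_get_firstOccurrence l x (get_firstOccurrence l x)

-- ===== LEMMAS AND PROOFS =====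

-- B's fold computes (count of elements < x, whether x occurs)
lemma pv_fold_char (x : Int) : ∀ (l : List Int) (c : Int) (f : Bool),
    l.foldl (fun (st : Int × Bool) v =>
      if v < x then (st.1 + 1, st.2) else if v == x then (st.1, true) else st) (c, f)
    = (c + (l.countP (fun a => decide (a < x)) : Int), f || decide (x ∈ l)) := by
  intro l
  induction l with
  | nil => intro c f; simp
  | cons a t ih =>
    intro c f
    rw [List.foldl_cons]
    by_cases hax : a < x
    · rw [if_pos hax, ih]
      have h2 : ¬ (x = a) := by omega
      simp [Prod.ext_iff, List.countP_cons, hax, List.mem_cons, h2]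
      push_cast; ring
    · by_cases heq : a = x
      · subst heq
        rw [if_neg hax, if_pos (by simp), ih]
        simp [Prod.ext_iff, List.countP_cons, hax, List.mem_cons]
      · rw [if_neg hax, if_neg (by simp [heq]), ih]
        have h2 : ¬ (x = a) := by omega
        simp [Prod.ext_iff, List.countP_cons, hax, List.mem_cons, h2]

lemma pv_alt_char (l : List Int) (x : Int) :
    get_firstOccurrence_alt l x
      = if x ∈ l then ((l.countP (fun a => decide (a < x)) : Nat) : Int) else -1 := by
  unfold get_firstOccurrence_alt
  rw [pv_fold_char]
  by_cases h : x ∈ l <;> simp [h]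

-- on a sorted list, an element is < x iff its index is below the count of elements < x
lemma pv_sorted_char (x : Int) : ∀ (s : List Int), s.Pairwise (· ≤ ·) →
    ∀ (i : Nat) (hi : i < s.length),
      (s[i] < x ↔ i < s.countP (fun a => decide (a < x))) := by
  intro s
  induction s with
  | nil => intro _ i hi; simp at hi
  | cons a t ih =>
    intro hp i hi
    rw [List.pairwise_cons] at hp
    obtain ⟨ha, ht⟩ := hp
    have hzero : ¬ a < x → t.countP (fun a => decide (a < x)) = 0 := by
      intro hax
      rw [List.countP_eq_zero]
      intro b hb
      have := ha b hb
      simp; omega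
    cases i with
    | zero =>
      simp only [List.getElem_cons_zero, List.countP_cons]
      constructor
      · intro h; simp [h]
      · intro h
        by_contra hax
        rw [hzero hax] at h
        simp [hax] at h
    | succ j =>
      simp only [List.getElem_cons_succ, List.countP_cons]
      have hj : j < t.length := by simpa using hi
      by_cases hax : a < x
      · rw [ih ht j hj]; simp [hax]
      · have hc := hzero hax
        have hle := ha t[j] (List.getElem_mem hj)
        simp [hc, hax]; omega

-- if x occurs in a sorted list, the count of elements < x is its first index
lemma pv_first_occ (s : List Int) (x : Int) (hs : s.Pairwise (· ≤ ·)) (hm : x ∈ s) :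
    ∃ hc : s.countP (fun a => decide (a < x)) < s.length,
      s[s.countP (fun a => decide (a < x))]'hc = x := by
  obtain ⟨j, hj, hjx⟩ := List.mem_iff_getElem.mp hm
  have hnlt : ¬ s[j] < x := by omega
  have hcj : s.countP (fun a => decide (a < x)) ≤ j := by
    by_contra h
    exact hnlt ((pv_sorted_char x s hs j hj).mpr (by omega))
  have hc : s.countP (fun a => decide (a < x)) < s.length := by omega
  refine ⟨hc, ?_⟩
  have h1 : ¬ s[s.countP (fun a => decide (a < x))] < x := by
    intro h
    have := (pv_sorted_char x s hs _ hc).mp h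
    omega
  have h2 : s[s.countP (fun a => decide (a < x))] ≤ x := by
    rcases Nat.lt_or_ge (s.countP (fun a => decide (a < x))) j with hlt | hge
    · have := (List.pairwise_iff_getElem.mp hs) _ _ hc hj hlt
      omega
    · have hcj' : s.countP (fun a => decide (a < x)) = j := by omega
      have : s[s.countP (fun a => decide (a < x))]'hc = s[j]'hj := by
        congr 1
      rw [this, hjx]
  omega

-- the binary-search loop returns the first index of x in a sorted list, or -1
lemma pv_bsLoop_eq (s : List Int) (x : Int) (hs : s.Pairwise (· ≤ ·)) :
    ∀ (n : Nat) (left right : Int), (right + 1 - left).toNat ≤ n →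
    0 ≤ left → right < (s.length : Int) →
    left ≤ (s.countP (fun a => decide (a < x)) : Int) →
    (x ∈ s → (s.countP (fun a => decide (a < x)) : Int) ≤ right) →
    pvBsLoop s x left right
      = if x ∈ s then ((s.countP (fun a => decide (a < x)) : Nat) : Int) else -1 := by
  intro n
  induction n with
  | zero =>
    intro left right hn h0 hlen hlc hrc
    have hlr : ¬ left ≤ right := by omega
    rw [pvBsLoop, dif_neg hlr]
    by_cases hm : x ∈ s
    · have := hrc hm; omega
    · simp [hm]
  | succ n ih =>
    intro left right hn h0 hlen hlc hrc
    by_cases hlr : left ≤ right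
    · have hb := PySem.Int.floordiv_two_mid_bounds (lo := left) (hi := right) hlr
      set c := s.countP (fun a => decide (a < x)) with hcdef
      set mid := PySem.Int.floordiv (left + right) 2 with hmid
      have hm0 : 0 ≤ mid := by omega
      have hmlen : mid < (s.length : Int) := by omega
      have hget : PySem.List.pyGet? s mid = some (s[mid.toNat]'(by omega)) :=
        PySem.List.pyGet?_eq_some_getElem s hm0 hmlen
      rw [pvBsLoop, dif_pos hlr]
      simp only [← hmid, hget, Option.getD_some]
      by_cases hxv : x < s[mid.toNat]'(by omega)
      · rw [if_pos hxv]
        have hcm : (c : Int) ≤ mid := by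
          have := (pv_sorted_char x s hs mid.toNat (by omega))
          omega
        have hrec : x ∈ s → (c : Int) ≤ mid - 1 := by
          intro hm
          obtain ⟨hc, hcx⟩ := pv_first_occ s x hs hm
          rcases eq_or_lt_of_le hcm with he | hl
          · exfalso
            have heq : s[mid.toNat]'(by omega)
                = s[s.countP (fun a => decide (a < x))]'hc := by
              congr 1; omega
            rw [heq, hcx] at hxv
            omega
          · omega
        exact ih left (mid - 1) (by omega) h0 (by omega) hlc hrec
      · by_cases hvx : s[mid.toNat]'(by omega) < x
        · rw [if_neg hxv, if_pos hvx]
          have hcm : mid < (c : Int) := by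
            have := (pv_sorted_char x s hs mid.toNat (by omega)).mp hvx
            omega
          exact ih (mid + 1) right (by omega) (by omega) hlen (by omega) hrc
        · -- s[mid] = x
          have hveq : s[mid.toNat]'(by omega) = x := by omega
          have hmem : x ∈ s := by rw [← hveq]; exact List.getElem_mem (by omega)
          have hcm : (c : Int) ≤ mid := by
            have := (pv_sorted_char x s hs mid.toNat (by omega))
            omega
          rw [if_neg hxv, if_neg hvx]
          by_cases hcond : mid = 0 ∨
              ¬ ((PySem.List.pyGet? s (mid - 1)).getD 0 = s[mid.toNat]'(by omega))
          · have hbool : (mid == 0 ||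
                !((PySem.List.pyGet? s (mid - 1)).getD 0 == s[mid.toNat]'(by omega))) = true := by
              simpa using hcond
            rw [if_pos hbool, if_pos hmem]
            by_cases hz : mid = 0
            · have : (c : Int) = 0 := by omega
              omega
            · have hne : ¬ ((PySem.List.pyGet? s (mid - 1)).getD 0 = s[mid.toNat]'(by omega)) := by
                tauto
              have hget1 : PySem.List.pyGet? s (mid - 1)
                  = some (s[(mid - 1).toNat]'(by omega)) :=
                PySem.List.pyGet?_eq_some_getElem s (by omega) (by omega)
              rw [hget1, Option.getD_some] at hne
              have hle := (List.pairwise_iff_getElem.mp hs) (mid - 1).toNat mid.toNat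
                (by omega) (by omega) (by omega)
              have hlt : s[(mid - 1).toNat]'(by omega) < x := by omega
              have := (pv_sorted_char x s hs (mid - 1).toNat (by omega)).mp hlt
              omega
          · push_neg at hcond
            obtain ⟨hz, heqp⟩ := hcond
            have hbool : (mid == 0 ||
                !((PySem.List.pyGet? s (mid - 1)).getD 0 == s[mid.toNat]'(by omega))) = false := by
              simp [hz, heqp]
            rw [if_neg (by simp [hbool])]
            have h1 : (0 : Int) ≤ mid - 1 := by omega
            have hget1 : PySem.List.pyGet? s (mid - 1)
                = some (s[(mid - 1).toNat]'(by omega)) :=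
              PySem.List.pyGet?_eq_some_getElem s h1 (by omega)
            rw [hget1, Option.getD_some] at heqp
            have hnlt : ¬ s[(mid - 1).toNat]'(by omega) < x := by
              rw [hveq] at heqp; omega
            have hcle : (c : Int) ≤ mid - 1 := by
              have := pv_sorted_char x s hs (mid - 1).toNat (by omega)
              omega
            exact ih left (mid - 1) (by omega) h0 (by omega) hlc (fun _ => hcle)
    · rw [pvBsLoop, dif_neg hlr]
      by_cases hm : x ∈ s
      · have := hrc hm; omega
      · simp [hm]

-- ===== VERDICT (by name: the statement is the Claim_ definition above) =====
theorem get_firstOccurrence_spec : Claim_equal_get_firstOccurrence := by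
  intro l x _
  unfold Spec_get_firstOccurrence get_firstOccurrence
  rw [pv_alt_char]
  have hs : (PySem.List.sorted l (fun a => a) false).Pairwise (· ≤ ·) :=
    PySem.List.sorted_pairwise l (fun a => a)
  have hperm : (PySem.List.sorted l (fun a => a) false).Perm l :=
    PySem.List.sorted_perm l (fun a => a) false
  have hmem : x ∈ PySem.List.sorted l (fun a => a) false ↔ x ∈ l := hperm.mem_iff
  have hcnt : (PySem.List.sorted l (fun a => a) false).countP (fun a => decide (a < x))
      = l.countP (fun a => decide (a < x)) := hperm.countP_eq _
  rw [pv_bsLoop_eq (PySem.List.sorted l (fun a => a) false) x hs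
    (PySem.List.sorted l (fun a => a) false).length 0
    (((PySem.List.sorted l (fun a => a) false).length : Int) - 1)
    (by omega) (by omega) (by omega) (by positivity)
    (fun hm => by
      obtain ⟨hc, _⟩ := pv_first_occ (PySem.List.sorted l (fun a => a) false) x hs hm
      omega)]
  simp only [hmem, hcnt]
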